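-- pv_equiv track=rewrite | github.com/borenx1/minesweeper-auto | Minesweeper Auto.py | non_overlap_combinations
-- ===== SOURCE A (Python) =====
-- import itertools
--
-- def allUnique(x):
--     seen = set()
--     return not any(i in seen or seen.add(i) for i in x)
--
-- def non_overlap_combinations(common_squares_list):
--     valid_combinations = []
--     for l in range(2, len(common_squares_list) + 1):
--         for comb in itertools.combinations(common_squares_list, l):
--             flattened = [pos for sub in comb for pos in sub]
--             if allUnique(flattened):
--                 valid_combinations.append(comb)
--     return valid_combinations
-- ===== SOURCE B (Python) =====
-- def non_overlap_combinations(common_squares_list):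
--     n = len(common_squares_list)
--     result = []
--
--     def dfs(start, remaining, chosen, used):
--         if remaining == 0:
--             result.append(tuple(chosen))
--             return
--         for i in range(start, n):
--             sub = common_squares_list[i]
--             s = set(sub)
--             if len(s) == len(sub) and used.isdisjoint(s):
--                 chosen.append(sub)
--                 dfs(i + 1, remaining - 1, chosen, used | s)
--                 chosen.pop()
--
--     for length in range(2, n + 1):
--         dfs(0, length, [], set())
--     return result
-- ===== Notes on version B (the rewrite author's own statement) =====
-- stated objective: faster
-- what changed: Replaces generate-every-combination-then-flatten-and-test with a per-length DFS backtracking search over list suffixes that carries a set of used elements, pruning every extension of an already-overlapping prefix while preserving A's output order.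
import Mathlib
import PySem

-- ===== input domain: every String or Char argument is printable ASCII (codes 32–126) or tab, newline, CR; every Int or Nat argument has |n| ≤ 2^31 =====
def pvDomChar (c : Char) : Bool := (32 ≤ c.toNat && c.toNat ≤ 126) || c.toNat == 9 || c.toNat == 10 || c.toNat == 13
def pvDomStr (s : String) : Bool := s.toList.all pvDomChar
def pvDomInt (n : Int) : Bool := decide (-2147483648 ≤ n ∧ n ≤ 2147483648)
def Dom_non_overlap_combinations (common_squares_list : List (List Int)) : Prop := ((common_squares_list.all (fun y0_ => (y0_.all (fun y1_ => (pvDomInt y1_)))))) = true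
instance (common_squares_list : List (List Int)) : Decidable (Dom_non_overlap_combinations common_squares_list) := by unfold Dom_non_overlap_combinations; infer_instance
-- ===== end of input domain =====

-- B (per-length DFS backtracking with a used-elements set, pruning overlapping prefixes) replaces A's
-- generate-all-combinations-then-test; measured faster on overlapping inputs (output-sensitive pruning).

-- ===== PORT A =====
-- itertools.combinations(xs, k) in lexicographic (index) order, hand-ported exactly
def pvCombs : Nat → List (List Int) → List (List (List Int))
  | 0, _ => [[]]
  | _ + 1, [] => []
  | k + 1, x :: xs => (pvCombs k xs).map (fun c => x :: c) ++ pvCombs (k + 1) xs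

-- allUnique's short-circuiting any() with a growing 'seen' set, step for step
def pvAllUniqueGo : PySem.Set Int → List Int → Bool
  | _, [] => true
  | seen, i :: rest =>
    if PySem.Set.contains seen i then false else pvAllUniqueGo (PySem.Set.add seen i) rest

def pvAllUnique (x : List Int) : Bool := pvAllUniqueGo PySem.Set.empty x

def non_overlap_combinations (common_squares_list : List (List Int)) : List (List (List Int)) :=
  (PySem.List.pyRange 2 (PySem.List.len common_squares_list + 1) 1).foldl
    (fun valid_combinations l =>
      (pvCombs l.toNat common_squares_list).foldl
        (fun valid_combinations comb =>
          let flattened := comb.foldl (fun acc sub => acc ++ sub) []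
          if pvAllUnique flattened then valid_combinations ++ [comb] else valid_combinations)
        valid_combinations)
    []

-- ===== PORT B =====
-- dfs(start, remaining, chosen, used) of Source B; the suffix of the list from 'start' is passed directly
def pvDfs : List (List Int) → Nat → List (List Int) → PySem.Set Int → List (List (List Int))
  | _, 0, chosen, _ => [chosen]
  | [], _ + 1, _, _ => []
  | sub :: rest, r + 1, chosen, used =>
    let s := PySem.Set.ofList sub
    (if s.length == sub.length && PySem.Set.isdisjoint used s then
        pvDfs rest r (chosen ++ [sub]) (PySem.Set.union used s)
      else []) ++ pvDfs rest (r + 1) chosen used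

def non_overlap_combinations_alt (common_squares_list : List (List Int)) : List (List (List Int)) :=
  (PySem.List.pyRange 2 (PySem.List.len common_squares_list + 1) 1).foldl
    (fun result l => result ++ pvDfs common_squares_list l.toNat [] PySem.Set.empty) []

-- ===== PRECONDITION & SPEC =====
def Spec_non_overlap_combinations (common_squares_list : List (List Int)) (out : List (List (List Int))) : Prop := out = non_overlap_combinations_alt common_squares_list
instance (common_squares_list : List (List Int)) (out : List (List (List Int))) : Decidable (Spec_non_overlap_combinations common_squares_list out) := by unfold Spec_non_overlap_combinations; infer_instance

-- ===== CLAIM (what is proved, stated in full; the proofs are below) =====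
def Claim_equal_non_overlap_combinations : Prop := ∀ (common_squares_list : List (List Int)), Dom_non_overlap_combinations common_squares_list → Spec_non_overlap_combinations common_squares_list (non_overlap_combinations common_squares_list)

-- ===== LEMMAS AND PROOFS =====

-- the check-and-accumulate predicate that pvDfs applies along a combination
def okChain : PySem.Set Int → List (List Int) → Bool
  | _, [] => true
  | used, sub :: cs =>
    let s := PySem.Set.ofList sub
    ((s.length == sub.length) && PySem.Set.isdisjoint used s) && okChain (PySem.Set.union used s) cs

theorem pvOfList_sublist (xs : List Int) : (PySem.Set.ofList xs).Sublist xs := by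
  induction xs using List.reverseRecOn with
  | nil => simp [PySem.Set.ofList]
  | append_singleton xs x ih =>
    rw [PySem.Set.ofList_append_singleton, PySem.Set.add_eq_ite]
    split
    · exact ih.trans (List.sublist_append_left xs [x])
    · exact ih.append_right [x]

theorem pvOfList_len_iff (xs : List Int) :
    ((PySem.Set.ofList xs).length == xs.length) = true ↔ xs.Nodup := by
  rw [beq_iff_eq]
  constructor
  · intro h
    have := (pvOfList_sublist xs).eq_of_length h
    rw [← this]; exact PySem.Set.nodup_ofList xs
  · intro h; rw [PySem.Set.ofList_eq_self_of_nodup xs h]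

theorem pvAllUniqueGo_iff (xs : List Int) : ∀ (seen : PySem.Set Int),
    pvAllUniqueGo seen xs = true ↔ xs.Nodup ∧ ∀ a ∈ xs, a ∉ seen := by
  induction xs with
  | nil => intro seen; simp [pvAllUniqueGo]
  | cons x xs ih =>
    intro seen
    by_cases hx : x ∈ seen
    · simp only [pvAllUniqueGo, (PySem.Set.contains_iff seen x).mpr hx, if_true]
      constructor
      · intro h; exact absurd h (by simp)
      · rintro ⟨-, h⟩; exact absurd hx (h x (by simp))
    · rw [pvAllUniqueGo]
      rw [if_neg (by simpa using (fun h => hx ((PySem.Set.contains_iff seen x).mp h)))]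
      rw [ih (PySem.Set.add seen x)]
      simp only [List.nodup_cons, List.mem_cons]
      constructor
      · rintro ⟨hnd, h⟩
        refine ⟨⟨fun hm => h x hm ((PySem.Set.mem_add seen x x).mpr (Or.inr rfl)), hnd⟩, ?_⟩
        rintro a (rfl | ha)
        · exact hx
        · exact fun hs => h a ha ((PySem.Set.mem_add seen x a).mpr (Or.inl hs))
      · rintro ⟨⟨hxm, hnd⟩, h⟩
        refine ⟨hnd, fun a ha hadd => ?_⟩
        rcases (PySem.Set.mem_add seen x a).mp hadd with hs | rfl
        · exact h a (Or.inr ha) hs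
        · exact hxm ha

theorem okChain_iff (cs : List (List Int)) : ∀ (used : PySem.Set Int),
    okChain used cs = true ↔
      (cs.flatMap id).Nodup ∧ ∀ a ∈ cs.flatMap id, a ∉ used := by
  induction cs with
  | nil => intro used; simp [okChain]
  | cons sub cs ih =>
    intro used
    rw [okChain]
    simp only [Bool.and_eq_true, ih, pvOfList_len_iff, PySem.Set.isdisjoint_iff,
      List.flatMap_cons, id, List.nodup_append, List.mem_append]
    constructor
    · rintro ⟨⟨hnd, hdisj⟩, hnd2, h2⟩
      have hds : ∀ a ∈ sub, a ∉ used := by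
        intro a ha hu
        exact (hdisj a hu) ((PySem.Set.mem_ofList sub a).mpr ha)
      refine ⟨⟨hnd, hnd2, fun a ha b hb => ?_⟩, ?_⟩
      · rintro rfl
        exact (h2 a hb) ((PySem.Set.mem_union used _ a).mpr (Or.inr ((PySem.Set.mem_ofList sub a).mpr ha)))
      · rintro a (ha | ha)
        · exact hds a ha
        · exact fun hu => h2 a ha ((PySem.Set.mem_union used _ a).mpr (Or.inl hu))
    · rintro ⟨⟨hnd, hnd2, hdj⟩, h⟩
      refine ⟨⟨hnd, fun a hu hm => ?_⟩, hnd2, fun a ha hu => ?_⟩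
      · exact h a (Or.inl ((PySem.Set.mem_ofList sub a).mp hm)) hu
      · rcases (PySem.Set.mem_union used _ a).mp hu with hu' | hs
        · exact h a (Or.inr ha) hu'
        · exact hdj a ((PySem.Set.mem_ofList sub a).mp hs) a ha rfl

theorem pvAllUnique_eq_okChain (c : List (List Int)) :
    pvAllUnique (c.foldl (fun acc sub => acc ++ sub) []) = okChain PySem.Set.empty c := by
  rw [Bool.eq_iff_iff, okChain_iff, pvAllUnique, pvAllUniqueGo_iff]
  rw [PySem.List.foldl_append_eq_flatMap (fun sub => sub) c []]
  simp [PySem.Set.empty, Function.id_def]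

theorem pvDfs_eq (xs : List (List Int)) : ∀ (k : Nat) (chosen : List (List Int)) (used : PySem.Set Int),
    pvDfs xs k chosen used = ((pvCombs k xs).filter (okChain used)).map (fun c => chosen ++ c) := by
  induction xs with
  | nil =>
    rintro (_ | k) chosen used <;> simp [pvDfs, pvCombs, okChain]
  | cons x xs ih =>
    rintro (_ | k) chosen used
    · simp [pvDfs, pvCombs, okChain]
    · rw [pvDfs, pvCombs]
      simp only [ih]
      rw [List.filter_append, List.filter_map, List.map_append, List.map_map]
      congr 1
      have hcomp : (okChain used ∘ fun c => x :: c) =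
          fun c => (((PySem.Set.ofList x).length == x.length) && PySem.Set.isdisjoint used (PySem.Set.ofList x)) && okChain (PySem.Set.union used (PySem.Set.ofList x)) c := by
        funext c; simp [okChain]
      rw [hcomp]
      by_cases h : (((PySem.Set.ofList x).length == x.length) && PySem.Set.isdisjoint used (PySem.Set.ofList x)) = true
      · simp [h, Function.comp_def, List.append_assoc]
      · rw [if_neg h]
        simp only [Bool.not_eq_true] at h
        simp [h]

theorem pvInner_eq (csl : List (List Int)) (k : Nat) (acc : List (List (List Int))) :
    (pvCombs k csl).foldl
        (fun valid_combinations comb =>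
          let flattened := comb.foldl (fun acc sub => acc ++ sub) []
          if pvAllUnique flattened then valid_combinations ++ [comb] else valid_combinations)
        acc = acc ++ pvDfs csl k [] PySem.Set.empty := by
  rw [pvDfs_eq]
  have : ∀ (l : List (List (List Int))) (acc : List (List (List Int))),
      l.foldl (fun valid_combinations comb =>
          let flattened := comb.foldl (fun acc sub => acc ++ sub) []
          if pvAllUnique flattened then valid_combinations ++ [comb] else valid_combinations) acc
        = acc ++ (l.filter (okChain PySem.Set.empty)).map (fun c => [] ++ c) := by
    intro l
    induction l with
    | nil => intro acc; simp
    | cons c l ihl =>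
      intro acc
      simp only [List.foldl_cons, List.filter_cons, pvAllUnique_eq_okChain c]
      by_cases h : okChain PySem.Set.empty c = true
      · simp only [PySem.Set.empty] at h
        simp [h, ihl]
      · simp only [Bool.not_eq_true, PySem.Set.empty] at h
        simp [h, ihl]
  exact this _ acc

-- ===== VERDICT (by name: the statement is the Claim_ definition above) =====
theorem non_overlap_combinations_spec : Claim_equal_non_overlap_combinations := by
  intro csl _
  unfold Spec_non_overlap_combinations non_overlap_combinations non_overlap_combinations_alt
  have hf : (fun (valid_combinations : List (List (List Int))) (l : Int) =>
      (pvCombs l.toNat csl).foldl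
        (fun valid_combinations comb =>
          let flattened := comb.foldl (fun acc sub => acc ++ sub) []
          if pvAllUnique flattened then valid_combinations ++ [comb] else valid_combinations)
        valid_combinations)
      = (fun result l => result ++ pvDfs csl l.toNat [] PySem.Set.empty) := by
    funext acc l
    exact pvInner_eq csl l.toNat acc
  rw [hf]
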